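-- pv_equiv track=rewrite | github.com/reynaprdz95/Enture-Financial | app.py | limpiar_texto
-- ===== SOURCE A (Python) =====
-- import unicodedata
--
-- def limpiar_texto(texto: str) -> str:
--     texto = str(texto).strip().lower()
--     texto = unicodedata.normalize('NFKD', texto).encode('ascii', 'ignore').decode('utf-8')
--     for ch in [' ', '-', '/', '.', '(', ')', '%']:
--         texto = texto.replace(ch, '_')
--     while '__' in texto:
--         texto = texto.replace('__', '_')
--     return texto.strip('_')
-- ===== SOURCE B (Python) =====
-- import unicodedata
--
-- def limpiar_texto(texto: str) -> str:
--     texto = unicodedata.normalize('NFKD', str(texto).strip().lower()).encode('ascii', 'ignore').decode('utf-8')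
--     out = []
--     pending = False
--     for c in texto:
--         if c in ' -/.()%_':
--             pending = True
--         else:
--             if pending and out:
--                 out.append('_')
--             out.append(c)
--             pending = False
--     return ''.join(out)
-- ===== Notes on version B (the rewrite author's own statement) =====
-- stated objective: idiomatic
-- what changed: Replaces A's seven full-string replace() passes plus the repeated pairwise-collapse while loop plus the final strip of separators by a single left-to-right scan with a pending-separator flag that emits each kept character once and inserts at most one separator between groups.
import Mathlib
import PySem

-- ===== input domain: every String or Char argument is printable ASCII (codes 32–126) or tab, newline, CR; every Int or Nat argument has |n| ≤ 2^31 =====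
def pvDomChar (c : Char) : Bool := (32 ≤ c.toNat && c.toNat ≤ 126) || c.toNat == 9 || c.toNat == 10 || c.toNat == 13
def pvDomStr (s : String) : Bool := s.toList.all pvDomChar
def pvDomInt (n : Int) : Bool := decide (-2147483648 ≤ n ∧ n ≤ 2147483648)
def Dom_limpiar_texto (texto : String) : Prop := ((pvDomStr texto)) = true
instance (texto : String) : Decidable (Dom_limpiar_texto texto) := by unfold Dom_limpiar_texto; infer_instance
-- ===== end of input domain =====

-- B replaces A's seven replace() passes, the repeated pairwise-collapse while loop and
-- the final strip by one left-to-right scan with a pending-separator flag (idiomatic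
-- single pass, same output).
-- The NFKD/ascii-encode step of both Pythons is the identity on the ASCII domain and is
-- ported as such (exact on Dom).

-- ===== PORT A =====
-- the while loop of A as a fuel-bounded loop, fuel = len (only makes the same
-- computation total; proved sufficient below).
def pvCollapse : Nat → String → String
  | 0, s => s
  | f+1, s => if PySem.Str.isIn "__" s then pvCollapse f (PySem.Str.replace s "__" "_") else s

def limpiar_texto (texto : String) : String :=
  -- str(texto).strip().lower(); then NFKD-normalize + ascii-encode/decode = identity on ASCII (exact on Dom)
  let t1 := PySem.Str.lower (PySem.Str.strip texto)
  let t2 := [" ", "-", "/", ".", "(", ")", "%"].foldl (fun s ch => PySem.Str.replace s ch "_") t1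
  let t3 := pvCollapse t2.toList.length t2
  PySem.Str.stripChars t3 "_"

-- ===== PORT B =====
def limpiar_texto_alt (texto : String) : String :=
  -- identical prefix: str(texto).strip().lower(); NFKD/ascii-encode = identity on ASCII (exact on Dom)
  let t := PySem.Str.lower (PySem.Str.strip texto)
  let st := t.toList.foldl (fun (st : List Char × Bool) c =>
      if c ∈ " -/.()%_".toList then (st.1, true)
      else if st.2 ∧ st.1 ≠ [] then (st.1 ++ ['_'] ++ [c], false)
      else (st.1 ++ [c], false)) ([], false)
  String.ofList st.1

-- ===== PRECONDITION & SPEC =====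
def Spec_limpiar_texto (texto : String) (out : String) : Prop := out = limpiar_texto_alt texto
instance (texto : String) (out : String) : Decidable (Spec_limpiar_texto texto out) := by unfold Spec_limpiar_texto; infer_instance

-- ===== CLAIM (what is proved, stated in full; the proofs are below) =====
def Claim_equal_limpiar_texto : Prop := ∀ (texto : String), Dom_limpiar_texto texto → Spec_limpiar_texto texto (limpiar_texto texto)

-- ===== LEMMAS AND PROOFS =====

-- the set of characters both programs treat as separators
def pvBig : List Char := [' ', '-', '/', '.', '(', ')', '%', '_']
-- the character map stage 1 of A performs
def pvF (c : Char) : Char := if c ∈ [' ', '-', '/', '.', '(', ')', '%'] then '_' else c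

-- full run-collapse of the separator character (the while loop's fixpoint)
def pvSq : List Char → List Char
  | [] => []
  | [c] => [c]
  | a :: b :: t => if a = '_' ∧ b = '_' then pvSq (b :: t) else a :: pvSq (b :: t)

-- one left-to-right pass of the pairwise replacement the while loop performs
def pvRp : List Char → List Char
  | [] => []
  | [c] => [c]
  | a :: b :: t => if a = '_' ∧ b = '_' then '_' :: pvRp t else a :: pvRp (b :: t)

def pvP (c : Char) : Bool := (['_'] : List Char).contains c

-- right strip of '_'
def pvRU (l : List Char) : List Char := (l.reverse.dropWhile pvP).reverse

-- B's scan, as three mutually recursive phases (empty output / inside a word / separator pending)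
mutual
  def pvOut : List Char → List Char
    | [] => []
    | c :: t => if c ∈ pvBig then pvOut t else c :: pvIn t
  def pvIn : List Char → List Char
    | [] => []
    | c :: t => if c ∈ pvBig then pvPend t else c :: pvIn t
  def pvPend : List Char → List Char
    | [] => []
    | c :: t => if c ∈ pvBig then pvPend t else '_' :: c :: pvIn t
end

-- ---- stage 1: the seven single-character replaces are one map ----

theorem pv_go_single (c d : Char) : ∀ (fuel : Nat) (l acc : List Char), l.length ≤ fuel →
    PySem.Chars.replace.go [c] [d] fuel l acc
      = acc.reverse ++ l.map (fun x => if x = c then d else x) := by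
  intro fuel
  induction fuel with
  | zero =>
      intro l acc h
      have : l = [] := List.length_eq_zero_iff.mp (Nat.le_zero.mp h)
      subst this; simp [PySem.Chars.replace.go]
  | succ f ih =>
      intro l acc h
      cases l with
      | nil => simp [PySem.Chars.replace.go]
      | cons a t =>
          by_cases ha : a = c
          · subst ha
            have hp : [a].isPrefixOf (a :: t) = true := by simp [List.isPrefixOf]
            simp only [PySem.Chars.replace.go, hp, if_pos]
            rw [show List.drop [a].length (a :: t) = t by simp,
                show [d].reverse ++ acc = d :: acc by simp]
            rw [ih t (d :: acc) (by simpa using Nat.succ_le_succ_iff.mp h)]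
            simp
          · have hp : [c].isPrefixOf (a :: t) = false := by
              simp [List.isPrefixOf]; exact fun hh => ha hh.symm
            simp only [PySem.Chars.replace.go, hp]
            rw [ih t (a :: acc) (by simpa using Nat.succ_le_succ_iff.mp h)]
            simp [ha]

theorem pv_replace_single (c d : Char) (l : List Char) :
    PySem.Chars.replace l [c] [d] = l.map (fun x => if x = c then d else x) := by
  simp [PySem.Chars.replace, pv_go_single c d l.length l [] le_rfl]

theorem pv_comp (x : Char) :
    (fun y => if y = '%' then '_' else y)
      ((fun y => if y = ')' then '_' else y)
        ((fun y => if y = '(' then '_' else y)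
          ((fun y => if y = '.' then '_' else y)
            ((fun y => if y = '/' then '_' else y)
              ((fun y => if y = '-' then '_' else y)
                ((fun y => if y = ' ' then '_' else y) x)))))) = pvF x := by
  by_cases h1 : x = ' '
  · subst h1; decide
  by_cases h2 : x = '-'
  · subst h2; decide
  by_cases h3 : x = '/'
  · subst h3; decide
  by_cases h4 : x = '.'
  · subst h4; decide
  by_cases h5 : x = '('
  · subst h5; decide
  by_cases h6 : x = ')'
  · subst h6; decide
  by_cases h7 : x = '%'
  · subst h7; decide
  simp [pvF, h1, h2, h3, h4, h5, h6, h7]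

theorem pv_stage1 (t : String) :
    ([" ", "-", "/", ".", "(", ")", "%"].foldl
        (fun s ch => PySem.Str.replace s ch "_") t).toList = t.toList.map pvF := by
  have hs : ∀ (s : String) (ch : String) (c : Char), ch.toList = [c] →
      (PySem.Str.replace s ch "_").toList
        = s.toList.map (fun x => if x = c then '_' else x) := by
    intro s ch c hch
    rw [PySem.Str.toList_replace, hch, show ("_" : String).toList = ['_'] by decide,
        pv_replace_single]
  simp only [List.foldl_cons, List.foldl_nil]
  rw [hs _ "%" '%' (by decide), hs _ ")" ')' (by decide), hs _ "(" '(' (by decide),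
      hs _ "." '.' (by decide), hs _ "/" '/' (by decide), hs _ "-" '-' (by decide),
      hs _ " " ' ' (by decide)]
  simp only [List.map_map, Function.comp_def]
  exact List.map_congr_left (fun x _ => pv_comp x)

-- ---- stage 2: the while-loop computes pvSq ----

theorem pv_go_pair : ∀ (fuel : Nat) (l acc : List Char), l.length ≤ fuel →
    PySem.Chars.replace.go ['_','_'] ['_'] fuel l acc = acc.reverse ++ pvRp l := by
  intro fuel
  induction fuel with
  | zero =>
      intro l acc h
      have : l = [] := List.length_eq_zero_iff.mp (Nat.le_zero.mp h)
      subst this; simp [PySem.Chars.replace.go, pvRp]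
  | succ f ih =>
      intro l acc h
      match l with
      | [] => simp [PySem.Chars.replace.go, pvRp]
      | [a] =>
          have hp : (['_','_'] : List Char).isPrefixOf [a] = false := by
            simp [List.isPrefixOf]
          simp only [PySem.Chars.replace.go, hp]
          rw [ih [] (a :: acc) (by simp)]
          simp [pvRp]
      | a :: b :: t =>
          by_cases hab : a = '_' ∧ b = '_'
          · obtain ⟨ha, hb⟩ := hab; subst ha; subst hb
            have hp : (['_','_'] : List Char).isPrefixOf ('_' :: '_' :: t) = true := by
              simp [List.isPrefixOf]
            simp only [PySem.Chars.replace.go, hp, if_pos]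
            rw [show List.drop (['_','_'] : List Char).length ('_' :: '_' :: t) = t by simp,
                show (['_'] : List Char).reverse ++ acc = '_' :: acc by simp]
            rw [ih t ('_' :: acc) (by simp at h ⊢; omega)]
            simp [pvRp]
          · have hp : (['_','_'] : List Char).isPrefixOf (a :: b :: t) = false := by
              simp [List.isPrefixOf]
              intro ha hb; exact hab ⟨ha.symm, hb.symm⟩
            simp only [PySem.Chars.replace.go, hp]
            rw [ih (b :: t) (a :: acc) (by simp at h ⊢; omega)]
            simp [pvRp, hab]

theorem pv_replace_pair (l : List Char) :
    PySem.Chars.replace l ['_','_'] ['_'] = pvRp l := by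
  simp [PySem.Chars.replace, pv_go_pair l.length l [] le_rfl]

theorem pvRp_length_le (l : List Char) : (pvRp l).length ≤ l.length := by
  fun_induction pvRp l
  all_goals simp_all
  all_goals omega

theorem pvRp_length_lt (l : List Char) (h : ['_','_'] <:+: l) :
    (pvRp l).length < l.length := by
  fun_induction pvRp l with
  | case1 => simp at h
  | case2 c => have := h.length_le; simp at this
  | case3 a b t hab ih =>
      have hle := pvRp_length_le t
      simp only [List.length_cons]
      omega
  | case4 a b t hab ih =>
      have hbt : ['_','_'] <:+: (b :: t) := by
        rcases List.infix_cons_iff.mp h with hpre | hinf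
        · rcases List.cons_prefix_cons.mp hpre with ⟨ha, hpre2⟩
          rcases List.cons_prefix_cons.mp hpre2 with ⟨hb, -⟩
          exact absurd ⟨ha.symm, hb.symm⟩ hab
        · exact hinf
      have := ih hbt
      simp only [List.length_cons] at this ⊢
      omega

theorem pvRp_head (l : List Char) : (pvRp l).head? = l.head? := by
  fun_induction pvRp l <;> simp_all

theorem pvSq_cons_u (x : List Char) :
    pvSq ('_' :: x) = if x.head? = some '_' then pvSq x else '_' :: pvSq x := by
  cases x with
  | nil => simp [pvSq]
  | cons b t =>
      by_cases hb : b = '_'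
      · subst hb; simp [pvSq]
      · simp [pvSq, hb, Ne.symm]

theorem pvSq_cons_ne (c : Char) (hc : c ≠ '_') (x : List Char) :
    pvSq (c :: x) = c :: pvSq x := by
  cases x with
  | nil => simp [pvSq]
  | cons b t => simp [pvSq, hc]

theorem pvSq_rp (l : List Char) : pvSq (pvRp l) = pvSq l := by
  fun_induction pvRp l with
  | case1 => rfl
  | case2 c => rfl
  | case3 a b t hab ih =>
      obtain ⟨ha, hb⟩ := hab; subst ha; subst hb
      rw [pvSq_cons_u, pvRp_head, ih]
      rw [show pvSq ('_' :: '_' :: t) = pvSq ('_' :: t) by simp [pvSq]]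
      rw [pvSq_cons_u]
  | case4 a b t hab ih =>
      by_cases ha : a = '_'
      · subst ha
        rw [pvSq_cons_u, pvSq_cons_u, pvRp_head, ih]
      · rw [pvSq_cons_ne a ha, pvSq_cons_ne a ha, ih]

theorem pvSq_of_no_infix (l : List Char) (h : ¬ (['_','_'] <:+: l)) : pvSq l = l := by
  fun_induction pvSq l with
  | case1 => rfl
  | case2 c => rfl
  | case3 a b t hab ih =>
      obtain ⟨ha, hb⟩ := hab; subst ha; subst hb
      exact absurd ⟨[], t, by simp⟩ h
  | case4 a b t hab ih =>
      have hbt : ¬ (['_','_'] <:+: (b :: t)) :=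
        fun hh => h (hh.trans (List.suffix_cons a (b :: t)).isInfix)
      rw [ih hbt]

theorem pv_collapse : ∀ (fuel : Nat) (s : String), s.toList.length ≤ fuel →
    (pvCollapse fuel s).toList = pvSq s.toList := by
  intro fuel
  induction fuel with
  | zero =>
      intro s h
      have : s.toList = [] := List.length_eq_zero_iff.mp (Nat.le_zero.mp h)
      simp [pvCollapse, this, pvSq]
  | succ f ih =>
      intro s h
      by_cases hin : PySem.Str.isIn "__" s = true
      · have hinf : ['_','_'] <:+: s.toList := by
          have := (PySem.Str.isIn_iff_infix (sub := "__") (s := s)).mp hin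
          simpa using this
        have hrep : (PySem.Str.replace s "__" "_").toList = pvRp s.toList := by
          rw [PySem.Str.toList_replace]
          rw [show ("__" : String).toList = ['_','_'] by decide,
              show ("_" : String).toList = ['_'] by decide]
          exact pv_replace_pair s.toList
        have hlen : (PySem.Str.replace s "__" "_").toList.length ≤ f := by
          rw [hrep]
          have := pvRp_length_lt s.toList hinf
          omega
        simp only [pvCollapse, hin, if_pos]
        rw [ih _ hlen, hrep, pvSq_rp]
      · have hninf : ¬ (['_','_'] <:+: s.toList) := by
          intro hh
          exact hin ((PySem.Str.isIn_iff_infix (sub := "__") (s := s)).mpr (by simpa using hh))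
        simp only [pvCollapse, hin]
        simp [pvSq_of_no_infix s.toList hninf]

-- ---- stage 3: the final strip ----

theorem pvP_eq (a : Char) : pvP a = (a == '_') := by
  by_cases h : a = '_'
  · subst h; decide
  · simp [pvP, h]

theorem pvRU_cons (a : Char) (x : List Char) :
    pvRU (a :: x) = if pvRU x = [] then (if a = '_' then [] else [a]) else a :: pvRU x := by
  have hcond : (pvRU x = []) ↔ ((x.reverse.dropWhile pvP).isEmpty = true) := by
    simp [pvRU]
  rw [show pvRU (a :: x) = ((x.reverse ++ [a]).dropWhile pvP).reverse by simp [pvRU],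
      List.dropWhile_append]
  by_cases he : (x.reverse.dropWhile pvP).isEmpty = true
  · rw [if_pos he, if_pos (hcond.mpr he)]
    by_cases ha : a = '_'
    · subst ha
      rw [if_pos rfl]
      simp only [List.dropWhile, pvP_eq]
      rw [show ('_' == '_') = true by decide]
      simp
    · rw [if_neg ha]
      simp only [List.dropWhile, pvP_eq]
      rw [show (a == '_') = false by simp [ha]]
      simp
  · rw [if_neg he, if_neg (fun hh => he (hcond.mp hh))]
    simp [pvRU]

theorem pvRU_cons_ne (a : Char) (ha : a ≠ '_') (x : List Char) :
    pvRU (a :: x) = a :: pvRU x := by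
  rw [pvRU_cons]
  by_cases he : pvRU x = [] <;> simp [he, ha]

theorem pv_strip_eq (l : List Char) :
    PySem.Chars.stripChars l ['_'] = pvRU (l.dropWhile pvP) := by
  rfl

-- ---- B's fold and the phase recursion ----

theorem pv_mem (c : Char) (h : c ∈ pvBig) : pvF c = '_' := by
  simp only [pvBig, List.mem_cons, List.not_mem_nil, or_false] at h
  rcases h with h|h|h|h|h|h|h|h <;> subst h <;> decide

theorem pv_nmem (c : Char) (h : c ∉ pvBig) : pvF c = c ∧ c ≠ '_' := by
  constructor
  · unfold pvF
    rw [if_neg]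
    intro hc
    exact h (by simp only [pvBig, List.mem_cons] at *; tauto)
  · intro hc; subst hc; exact h (by simp [pvBig])

theorem pv_H (l : List Char) :
    pvRU (pvSq (l.map pvF)) = pvIn l ∧ pvRU (pvSq ('_' :: l.map pvF)) = pvPend l := by
  induction l with
  | nil =>
      exact ⟨by decide, by decide⟩
  | cons c t ih =>
      obtain ⟨ih1, ih2⟩ := ih
      by_cases hc : c ∈ pvBig
      · have hf := pv_mem c hc
        refine ⟨?_, ?_⟩
        · rw [List.map_cons, hf, ih2, show pvIn (c :: t) = if c ∈ pvBig then pvPend t else c :: pvIn t from rfl, if_pos hc]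
        · rw [List.map_cons, hf,
              show pvSq ('_' :: '_' :: t.map pvF) = pvSq ('_' :: t.map pvF) by simp [pvSq],
              ih2, show pvPend (c :: t) = if c ∈ pvBig then pvPend t else '_' :: c :: pvIn t from rfl, if_pos hc]
      · obtain ⟨hf, hne⟩ := pv_nmem c hc
        refine ⟨?_, ?_⟩
        · rw [List.map_cons, hf, pvSq_cons_ne c hne, pvRU_cons_ne c hne, ih1,
              show pvIn (c :: t) = if c ∈ pvBig then pvPend t else c :: pvIn t from rfl, if_neg hc]
        · rw [List.map_cons, hf, pvSq_cons_u,
              if_neg (show ¬ (c :: t.map pvF).head? = some '_' by simp [hne]),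
              pvSq_cons_ne c hne, pvRU_cons, pvRU_cons_ne c hne,
              if_neg (List.cons_ne_nil c _), ih1,
              show pvPend (c :: t) = if c ∈ pvBig then pvPend t else '_' :: c :: pvIn t from rfl, if_neg hc]

theorem pv_dropWhile_u (x : List Char) : List.dropWhile pvP ('_' :: x) = List.dropWhile pvP x := by
  simp [List.dropWhile, pvP_eq]

theorem pv_dropWhile_ne (c : Char) (hc : c ≠ '_') (x : List Char) :
    List.dropWhile pvP (c :: x) = c :: x := by
  simp only [List.dropWhile, pvP_eq]
  rw [show (c == '_') = false by simp [hc]]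

theorem pv_M (l : List Char) :
    PySem.Chars.stripChars (pvSq (l.map pvF)) ['_'] = pvOut l := by
  induction l with
  | nil => rfl
  | cons c t ih =>
      by_cases hc : c ∈ pvBig
      · have hf := pv_mem c hc
        rw [List.map_cons, hf, pv_strip_eq,
            show List.dropWhile pvP (pvSq ('_' :: t.map pvF))
                = List.dropWhile pvP (pvSq (t.map pvF)) by
              rw [pvSq_cons_u]
              by_cases hh : (t.map pvF).head? = some '_'
              · rw [if_pos hh]
              · rw [if_neg hh, pv_dropWhile_u],
            ← pv_strip_eq, ih,
            show pvOut (c :: t) = if c ∈ pvBig then pvOut t else c :: pvIn t from rfl, if_pos hc]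
      · obtain ⟨hf, hne⟩ := pv_nmem c hc
        rw [List.map_cons, hf, pv_strip_eq, pvSq_cons_ne c hne, pv_dropWhile_ne c hne,
            pvRU_cons_ne c hne, (pv_H t).1,
            show pvOut (c :: t) = if c ∈ pvBig then pvOut t else c :: pvIn t from rfl, if_neg hc]

theorem pv_fold (m : List Char) : ∀ (acc : List Char) (pend : Bool),
    (m.foldl (fun (st : List Char × Bool) c =>
      if c ∈ " -/.()%_".toList then (st.1, true)
      else if st.2 ∧ st.1 ≠ [] then (st.1 ++ ['_'] ++ [c], false)
      else (st.1 ++ [c], false)) (acc, pend)).1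
    = if acc = [] then pvOut m else acc ++ (if pend then pvPend m else pvIn m) := by
  have hbig : (" -/.()%_" : String).toList = pvBig := by decide
  induction m with
  | nil =>
      intro acc pend
      by_cases he : acc = [] <;> by_cases hp : pend = true <;>
        simp [he, hp, pvOut, pvPend, pvIn]
  | cons c t ih =>
      intro acc pend
      rw [List.foldl_cons]
      by_cases hc : c ∈ pvBig
      · rw [if_pos (by rw [hbig]; exact hc)]
        rw [ih acc true]
        by_cases he : acc = [] <;> by_cases hp : pend = true <;>
          simp [he, hp, pvOut, pvPend, pvIn, hc]
      · rw [if_neg (by rw [hbig]; exact hc)]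
        by_cases he : acc = []
        · subst he
          rw [if_neg (by simp)]
          rw [show (([] : List Char) ++ [c], false) = ([c], false) by simp]
          rw [ih [c] false]
          simp [pvOut, hc]
        · by_cases hp : pend = true
          · subst hp
            rw [if_pos ⟨rfl, he⟩]
            rw [ih (acc ++ ['_'] ++ [c]) false]
            simp [he, pvPend, hc]
          · rw [if_neg (by simp [hp])]
            rw [ih (acc ++ [c]) false]
            simp [he, hp, pvIn, hc]

-- ===== VERDICT (by name: the statement is the Claim_ definition above) =====
theorem limpiar_texto_spec : Claim_equal_limpiar_texto := by
  intro texto _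
  unfold Spec_limpiar_texto limpiar_texto limpiar_texto_alt
  dsimp only
  apply String.toList_inj.mp
  rw [PySem.Str.toList_stripChars, show ("_" : String).toList = ['_'] by decide,
      pv_collapse _ _ le_rfl, pv_stage1, pv_M]
  rw [String.toList_ofList, pv_fold]
  simp
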